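-- pv_equiv track=rewrite | github.com/Codar-Sistemas/hospitais-referencia-api | scripts/parser_ocr.py | _mesclar_linhas_quebradas
-- ===== SOURCE A (Python) =====
-- def _mesclar_linhas_quebradas(
--     registros_parciais: list[dict],
-- ) -> list[dict]:
--     """
--     Em PDFs escaneados, hospitais frequentemente ocupam múltiplas "linhas"
--     do OCR porque o Tesseract separa linhas visuais onde havia só uma lógica.
--
--     Heurística: se uma linha tem município vazio mas as outras células
--     têm conteúdo, ela provavelmente é continuação da linha anterior.
--     """
--     mesclados: list[dict] = []
--     for reg in registros_parciais:
--         if not reg.get("municipio") and mesclados: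
--             anterior = mesclados[-1]
--             for campo in ("unidade", "endereco", "telefones", "cnes", "atendimentos_raw"):
--                 novo = reg.get(campo)
--                 if novo:
--                     if anterior.get(campo):
--                         anterior[campo] = f"{anterior[campo]} {novo}"
--                     else:
--                         anterior[campo] = novo
--         else:
--             mesclados.append(reg)
--     return mesclados
-- ===== SOURCE B (Python) =====
-- _CAMPOS = ("unidade", "endereco", "telefones", "cnes", "atendimentos_raw")
--
--
-- def _absorver(head: dict, cont: dict) -> None:
--     """Fold one continuation line's fields into the head record (in place)."""
--     for campo in _CAMPOS:
--         novo = cont.get(campo)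
--         if novo:
--             atual = head.get(campo)
--             head[campo] = f"{atual} {novo}" if atual else novo
--
--
-- def _mesclar_linhas_quebradas(
--     registros_parciais: list[dict],
-- ) -> list[dict]:
--     # Walk the records BACK TO FRONT, buffering continuation lines until their
--     # head appears.  A head is any record with truthy municipio, or record 0
--     # (the first record always starts a group in the merged output).
--     resultado: list[dict] = []
--     pendentes: list[dict] = []
--     for idx in range(len(registros_parciais) - 1, -1, -1):
--         reg = registros_parciais[idx]
--         if reg.get("municipio") or idx == 0:
--             for cont in reversed(pendentes):
--                 _absorver(reg, cont)
--             pendentes = []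
--             resultado.append(reg)
--         else:
--             pendentes.append(reg)
--     resultado.reverse()
--     return resultado
-- ===== Notes on version B (the rewrite author's own statement) =====
-- stated objective: alternative
-- what changed: Replaces A's forward accumulator loop that mutates the last appended head with a reverse traversal that buffers continuation lines in a pending stack and flushes them into each head (any record with truthy municipio, or record 0) when it is reached, reversing the result at the end.
import Mathlib
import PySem

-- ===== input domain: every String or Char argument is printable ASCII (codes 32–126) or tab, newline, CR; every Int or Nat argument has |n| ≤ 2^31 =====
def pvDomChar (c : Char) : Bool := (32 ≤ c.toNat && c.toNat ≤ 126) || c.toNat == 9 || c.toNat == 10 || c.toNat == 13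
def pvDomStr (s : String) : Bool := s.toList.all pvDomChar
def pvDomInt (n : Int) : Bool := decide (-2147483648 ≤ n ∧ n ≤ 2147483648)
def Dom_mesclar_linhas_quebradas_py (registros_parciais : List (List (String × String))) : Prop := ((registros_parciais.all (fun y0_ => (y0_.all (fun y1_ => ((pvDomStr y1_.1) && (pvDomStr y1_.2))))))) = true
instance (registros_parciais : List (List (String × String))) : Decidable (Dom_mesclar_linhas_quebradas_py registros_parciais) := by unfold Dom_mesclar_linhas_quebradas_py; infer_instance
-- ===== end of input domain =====

-- B replaces A's forward accumulator loop (which mutates mesclados[-1]) with a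
-- reverse traversal that buffers continuation lines in a pending stack and
-- flushes them into each head when it is reached, reversing the result at the
-- end. Objective: alternative (same linear cost). Both A and B mutate the input
-- dicts in place and return the same dict objects; the equivalence proved here
-- is about the returned value.

-- Shared Python-dict primitives on association lists (exact: first-match lookup,
-- overwrite-in-place insert, append for a new key — CPython dict semantics).
def pvGet? (d : List (String × String)) (k : String) : Option String :=
  match d with
  | [] => none
  | (k', v) :: rest => if k' = k then some v else pvGet? rest k

def pvInsert (d : List (String × String)) (k v : String) : List (String × String) :=
  match d with
  | [] => [(k, v)]
  | (k', v') :: rest => if k' = k then (k, v) :: rest else (k', v') :: pvInsert rest k v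

-- Python truthiness of `reg.get(campo)` (None or "" is falsy)
def pvTruthy (o : Option String) : Bool :=
  match o with
  | none => false
  | some s => s ≠ ""

def pvCampos : List String := ["unidade", "endereco", "telefones", "cnes", "atendimentos_raw"]

-- ===== PORT A =====
-- the inner `for campo in (...)` loop of A, acting on `anterior`
def pvMergeA (anterior reg : List (String × String)) : List (String × String) :=
  pvCampos.foldl (fun ant campo =>
    match pvGet? reg campo with
    | none => ant
    | some novo =>
      if novo = "" then ant
      else
        match pvGet? ant campo with
        | some atual =>
          if atual ≠ "" then pvInsert ant campo (atual ++ " " ++ novo)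
          else pvInsert ant campo novo
        | none => pvInsert ant campo novo) anterior

-- `anterior = mesclados[-1]` is mutated in place: update the last element
def pvSetLast (xs : List (List (String × String))) (f : List (String × String) → List (String × String)) : List (List (String × String)) :=
  match xs with
  | [] => []
  | [x] => [f x]
  | x :: y :: rest => x :: pvSetLast (y :: rest) f

def mesclar_linhas_quebradas_py (registros_parciais : List (List (String × String))) : List (List (String × String)) :=
  registros_parciais.foldl (fun mesclados reg =>
    if ¬ pvTruthy (pvGet? reg "municipio") ∧ mesclados ≠ [] then
      pvSetLast mesclados (fun anterior => pvMergeA anterior reg)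
    else mesclados ++ [reg]) []

-- ===== PORT B =====
-- _absorver: fold one continuation's fields into the head
def pvAbsorver (head cont : List (String × String)) : List (String × String) :=
  pvCampos.foldl (fun h campo =>
    match pvGet? cont campo with
    | none => h
    | some novo =>
      if novo = "" then h
      else
        let atual := pvGet? h campo
        pvInsert h campo (if pvTruthy atual then atual.getD "" ++ " " ++ novo else novo)) head

-- `for cont in reversed(pendentes): _absorver(reg, cont)`: pendentes is a stack
-- built while walking backwards (cons = append), so its cons order is already
-- the forward document order and a left fold is exactly that loop.
def pvAbsorbAll (head : List (String × String)) (pendentes : List (List (String × String))) : List (String × String) :=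
  pendentes.foldl pvAbsorver head

-- one step of Source B's reverse index loop for idx > 0, state = (resultado, pendentes);
-- consing onto resultado while moving right-to-left realises `append` + the final
-- `resultado.reverse()`.
def pvStepB (reg : List (String × String)) (st : List (List (String × String)) × List (List (String × String))) : List (List (String × String)) × List (List (String × String)) :=
  if pvTruthy (pvGet? reg "municipio") then (pvAbsorbAll reg st.2 :: st.1, [])
  else (st.1, reg :: st.2)

def mesclar_linhas_quebradas_py_alt (registros_parciais : List (List (String × String))) : List (List (String × String)) :=
  match registros_parciais with
  | [] => []
  | r0 :: rest =>
    -- `for idx in range(n-1, 0, -1)` = a right fold over rest; idx == 0 is the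
    -- unconditional head case, handled last.
    let st := rest.foldr pvStepB ([], [])
    pvAbsorbAll r0 st.2 :: st.1

-- ===== PRECONDITION & SPEC =====
def Spec_mesclar_linhas_quebradas_py (registros_parciais : List (List (String × String))) (out : List (List (String × String))) : Prop := out = mesclar_linhas_quebradas_py_alt registros_parciais
instance (registros_parciais : List (List (String × String))) (out : List (List (String × String))) : Decidable (Spec_mesclar_linhas_quebradas_py registros_parciais out) := by unfold Spec_mesclar_linhas_quebradas_py; infer_instance

-- ===== CLAIM (what is proved, stated in full; the proofs are below) =====
def Claim_equal_mesclar_linhas_quebradas_py : Prop := ∀ (registros_parciais : List (List (String × String))), Dom_mesclar_linhas_quebradas_py registros_parciais → Spec_mesclar_linhas_quebradas_py registros_parciais (mesclar_linhas_quebradas_py registros_parciais)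

-- ===== LEMMAS AND PROOFS =====

-- the two merge helpers compute the same record
theorem mergeA_eq_absorver (anterior reg : List (String × String)) :
    pvMergeA anterior reg = pvAbsorver anterior reg := by
  unfold pvMergeA pvAbsorver
  congr 1
  funext ant campo
  cases h : pvGet? reg campo with
  | none => rfl
  | some novo =>
    by_cases hn : novo = ""
    · simp [hn]
    · cases ha : pvGet? ant campo with
      | none => simp [hn, pvTruthy]
      | some atual =>
        by_cases hatual : atual = "" <;> simp [hn, hatual, pvTruthy]

theorem setLast_append (acc : List (List (String × String))) (h : List (String × String))
    (f : List (String × String) → List (String × String)) :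
    pvSetLast (acc ++ [h]) f = acc ++ [f h] := by
  induction acc with
  | nil => rfl
  | cons a acc ih =>
    cases acc with
    | nil => rfl
    | cons b acc' => simpa [pvSetLast] using ih

-- B's value on a nonempty list h :: rs, as a function of the head
def pvGoB (h : List (String × String)) (rs : List (List (String × String))) : List (List (String × String)) :=
  let st := rs.foldr pvStepB ([], [])
  pvAbsorbAll h st.2 :: st.1

-- A's fold, started with an accumulator whose last element is the current head,
-- computes B's reverse-buffer decomposition
theorem foldl_eq_goB (rs : List (List (String × String))) :
    ∀ (h : List (String × String)) (acc : List (List (String × String))),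
    rs.foldl (fun mesclados reg =>
      if ¬ pvTruthy (pvGet? reg "municipio") ∧ mesclados ≠ [] then
        pvSetLast mesclados (fun anterior => pvMergeA anterior reg)
      else mesclados ++ [reg]) (acc ++ [h]) = acc ++ pvGoB h rs := by
  induction rs with
  | nil =>
    intro h acc
    simp [pvGoB, pvAbsorbAll]
  | cons r rs ih =>
    intro h acc
    rw [List.foldl_cons]
    by_cases hm : pvTruthy (pvGet? r "municipio") = true
    · have hcond : ¬ (¬ pvTruthy (pvGet? r "municipio") ∧ (acc ++ [h] : List _) ≠ []) := by
        simp [hm]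
      rw [if_neg hcond]
      have : (acc ++ [h]) ++ [r] = (acc ++ [h]) ++ [r] := rfl
      rw [show (acc ++ [h] ++ [r] : List _) = (acc ++ [h]) ++ [r] from rfl, ih r (acc ++ [h])]
      simp [pvGoB, pvStepB, hm, pvAbsorbAll, List.append_assoc]
    · have hcond : (¬ pvTruthy (pvGet? r "municipio") ∧ (acc ++ [h] : List _) ≠ []) := by
        simp [hm]
      rw [if_pos hcond, setLast_append, ih (pvMergeA h r) acc]
      simp only [pvGoB, List.foldr_cons, pvStepB, hm, if_neg, Bool.false_eq_true,
        not_false_eq_true]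
      rw [mergeA_eq_absorver]
      simp [pvAbsorbAll]

-- ===== VERDICT (by name: the statement is the Claim_ definition above) =====
theorem mesclar_linhas_quebradas_py_spec : Claim_equal_mesclar_linhas_quebradas_py := by
  intro registros _
  unfold Spec_mesclar_linhas_quebradas_py mesclar_linhas_quebradas_py mesclar_linhas_quebradas_py_alt
  cases registros with
  | nil => rfl
  | cons r rs =>
    rw [List.foldl_cons]
    have hstep : (if ¬ pvTruthy (pvGet? r "municipio") ∧ ([] : List (List (String × String))) ≠ [] then
        pvSetLast [] (fun anterior => pvMergeA anterior r)
      else [] ++ [r]) = ([] : List (List (String × String))) ++ [r] := by simp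
    rw [hstep]
    simpa [pvGoB] using foldl_eq_goB rs r []
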